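-- pv_equiv track=rewrite | github.com/Ashiq-am/Data-Structures-Algorithm | 1.Python Algorithms/8.Bitwise Algorithms/2.Intermediate/115.Check if a number is power of 8 or not/Example 3.py | checkPowerof8
-- ===== SOURCE A (Python) =====
-- def checkPowerof8(n):
--     # Variable i will denote the bit
--     # that we are currently at
--     i = 0
--     l = 1
--
--     while (i <= 63):
--         l <<= i
--
--         # If only set bit in n
--         # is at position i
--         if (l == n):
--             return True
--
--         # Get to next valid bit position
--         i += 3
--         l = 1
--
--     return False
-- ===== SOURCE B (Python) =====
-- _POWERS = {8 ** k for k in range(22)}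
--
-- def checkPowerof8(n):
--     return n in _POWERS
-- ===== Notes on version B (the rewrite author's own statement) =====
-- stated objective: simpler
-- what changed: Replaced the 22-iteration shift-and-compare loop with a precomputed set of the powers 8^0..8^21 and a single membership test.
import Mathlib
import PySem

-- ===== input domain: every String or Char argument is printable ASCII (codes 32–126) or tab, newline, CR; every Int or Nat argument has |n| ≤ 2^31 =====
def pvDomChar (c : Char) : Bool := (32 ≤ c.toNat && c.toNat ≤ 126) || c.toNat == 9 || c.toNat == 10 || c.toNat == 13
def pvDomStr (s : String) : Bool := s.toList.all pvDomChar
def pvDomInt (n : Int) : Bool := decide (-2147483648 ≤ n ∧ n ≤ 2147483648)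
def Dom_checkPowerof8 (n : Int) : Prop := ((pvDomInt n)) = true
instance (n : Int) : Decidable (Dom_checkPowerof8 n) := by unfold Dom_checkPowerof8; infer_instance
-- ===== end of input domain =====

-- B replaces A's shift-and-compare loop over bit positions with a single membership
-- test in the precomputed set {8^k | 0 <= k <= 21} (objective: simpler).


-- ===== PORT A =====
-- loop: while i <= 63: l <<= i; if l == n: return True; i += 3; l = 1
-- (fuel 64 > 22 iterations, so the fuel case is never the exit; i stays >= 0, so the
-- shift l <<= i is l * 2 ^ i.toNat exactly)
def pyALoop : Nat → Int → Int → Int → Bool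
  | 0, _, _, _ => false
  | fuel+1, i, l, n =>
    if i ≤ 63 then
      let l2 := l * 2 ^ i.toNat
      if l2 = n then true
      else pyALoop fuel (i + 3) 1 n
    else false

def checkPowerof8 (n : Int) : Bool := pyALoop 64 0 1 n

-- ===== PORT B =====
-- B: membership of n in the precomputed set {8^k | k < 22}
def pvPowers : PySem.Set Int := PySem.Set.ofList ((List.range 22).map (fun k => (8:Int) ^ k))

def checkPowerof8_alt (n : Int) : Bool := pvPowers.contains n

-- ===== PRECONDITION & SPEC =====
def Spec_checkPowerof8 (n : Int) (out : Bool) : Prop := out = checkPowerof8_alt n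
instance (n : Int) (out : Bool) : Decidable (Spec_checkPowerof8 n out) := by unfold Spec_checkPowerof8; infer_instance

-- ===== CLAIM (what is proved, stated in full; the proofs are below) =====
def Claim_equal_checkPowerof8 : Prop := ∀ (n : Int), Dom_checkPowerof8 n → Spec_checkPowerof8 n (checkPowerof8 n)

-- ===== LEMMAS AND PROOFS =====

-- ===== VERDICT (by name: the statement is the Claim_ definition above) =====
theorem checkPowerof8_spec : Claim_equal_checkPowerof8 := by
  intro n _
  unfold Spec_checkPowerof8 checkPowerof8 checkPowerof8_alt pvPowers
  simp only [pyALoop, PySem.Set.ofList, List.range_succ]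
  simp [eq_comm]
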